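-- pv_equiv track=rewrite | github.com/yxtj/GSDM | CmpEdgeAnalysis/prune_graph.py | sortUpEdgeList
-- ===== SOURCE A (Python) =====
-- def sortUpEdgeList(elist):
--     res = list(elist)
--     for e in res:
--         if e[0] > e[1]:
--             e = e[1], e[0]
--     res.sort()
--     # unique
--     f1, f2, l = 0, 1, len(elist)
--     while f2 < l:
--         if res[f1] != res[f2]:
--             f1 += 1
--             res[f1] = res[f2]
--         f2 += 1
--     if f1 != l - 1:
--         res = res[:f1 + 1]
--     return res
-- ===== SOURCE B (Python) =====
-- def sortUpEdgeList(elist):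
--     return sorted(set(elist))
-- ===== Notes on version B (the rewrite author's own statement) =====
-- stated objective: idiomatic
-- what changed: B deduplicates via a hash set and sorts the distinct edges (sorted(set(elist))), replacing A's sort followed by an in-place two-pointer consecutive-duplicate compaction; A's 'e = e[1], e[0]' loop is a no-op (it rebinds the loop variable), so both return the sorted distinct edges.
import Mathlib
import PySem

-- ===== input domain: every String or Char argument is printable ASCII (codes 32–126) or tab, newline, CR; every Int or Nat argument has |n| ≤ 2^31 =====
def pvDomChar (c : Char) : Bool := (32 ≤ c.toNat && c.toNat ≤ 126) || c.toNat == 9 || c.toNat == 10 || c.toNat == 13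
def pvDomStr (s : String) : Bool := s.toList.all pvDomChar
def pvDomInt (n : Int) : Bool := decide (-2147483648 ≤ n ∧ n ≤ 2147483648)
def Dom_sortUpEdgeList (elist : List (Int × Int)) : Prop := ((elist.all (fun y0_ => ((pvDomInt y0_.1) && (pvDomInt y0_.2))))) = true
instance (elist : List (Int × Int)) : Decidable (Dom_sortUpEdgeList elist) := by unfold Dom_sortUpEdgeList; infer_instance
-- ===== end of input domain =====

-- B replaces A's sort-then-two-pointer-compaction by the idiomatic sorted(set(elist));
-- A's 'for e in res' normalisation loop is a no-op (it only rebinds the loop variable).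


-- ===== PORT A =====
-- the 'while f2 < l' loop, transliterated as fuel recursion (fuel = remaining iterations);
-- res[f1] is PySem.List.pyGetD and 'res[f1] = v' is PySem.List.pySetD (the indices reached are always in range)
def pruneLoop : List (Int × Int) → Int → Int → Int → Nat → List (Int × Int) × Int
  | res, f1, _, _, 0 => (res, f1)
  | res, f1, f2, l, fuel + 1 =>
    if f2 < l then
      if PySem.List.pyGetD res f1 (0, 0) ≠ PySem.List.pyGetD res f2 (0, 0) then
        pruneLoop (PySem.List.pySetD res (f1 + 1) (PySem.List.pyGetD res f2 (0, 0))) (f1 + 1) (f2 + 1) l fuel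
      else
        pruneLoop res f1 (f2 + 1) l fuel
    else (res, f1)

def sortUpEdgeList (elist : List (Int × Int)) : List (Int × Int) :=
  let res := elist  -- res = list(elist): a copy
  -- 'for e in res: if e[0] > e[1]: e = e[1], e[0]' — the tuple assignment rebinds the loop
  -- variable e only, so the loop does not change res; transliterated as a Unit fold
  let _ := res.foldl (fun (u : Unit) e => if e.1 > e.2 then () else u) ()
  let res := PySem.List.sorted2 res Prod.fst Prod.snd  -- res.sort(): tuples compare lexicographically
  let l : Int := PySem.List.len elist
  let p := pruneLoop res 0 1 l (l - 1).toNat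
  let res := p.1
  let f1 := p.2
  if f1 ≠ l - 1 then PySem.List.slice res none (some (f1 + 1)) else res

-- ===== PORT B =====
def sortUpEdgeList_alt (elist : List (Int × Int)) : List (Int × Int) :=
  PySem.List.sorted2 (PySem.Set.ofList elist) Prod.fst Prod.snd

-- ===== PRECONDITION & SPEC =====
def Spec_sortUpEdgeList (elist : List (Int × Int)) (out : List (Int × Int)) : Prop := out = sortUpEdgeList_alt elist
instance (elist : List (Int × Int)) (out : List (Int × Int)) : Decidable (Spec_sortUpEdgeList elist out) := by unfold Spec_sortUpEdgeList; infer_instance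

-- ===== CLAIM (what is proved, stated in full; the proofs are below) =====
def Claim_equal_sortUpEdgeList : Prop := ∀ (elist : List (Int × Int)), Dom_sortUpEdgeList elist → Spec_sortUpEdgeList elist (sortUpEdgeList elist)

-- ===== LEMMAS AND PROOFS =====

-- Python's tuple comparison as a single lexicographic key
def lexKey (x : Int × Int) : Lex (Int × Int) := toLex x

-- consecutive-duplicate removal with a 'previous element' accumulator
def dedupFrom (prev : Int × Int) : List (Int × Int) → List (Int × Int)
  | [] => []
  | x :: xs => if x = prev then dedupFrom prev xs else x :: dedupFrom x xs

-- sorting by the pair of keys (fst, snd) is sorting by the lexicographic key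
lemma sorted2_eq_sorted_lex (xs : List (Int × Int)) :
    PySem.List.sorted2 xs Prod.fst Prod.snd = PySem.List.sorted xs lexKey := by
  simp only [PySem.List.sorted2, PySem.List.sorted]
  have hb : (fun (a b : Int × Int) =>
      decide (a.1 < b.1) || !decide (b.1 < a.1) && decide (a.2 < b.2)) =
      (fun a b => decide (lexKey a < lexKey b)) := by
    funext a b
    by_cases h1 : a.1 < b.1 <;> by_cases h2 : b.1 < a.1 <;> by_cases h3 : a.2 < b.2 <;>
      simp [lexKey, Prod.Lex.toLex_lt_toLex, h1, h2, h3] <;> omega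
  rw [hb]
  simp

lemma lexKey_inj : Function.Injective lexKey := fun a b h => by
  simpa [lexKey] using h

-- dedupFrom on a key-sorted list: strictly increasing, same members
lemma dedupFrom_spec (t : List (Int × Int)) : ∀ prev : Int × Int,
    (prev :: t).Pairwise (fun a b => lexKey a ≤ lexKey b) →
    ((prev :: dedupFrom prev t).Pairwise (fun a b => lexKey a < lexKey b) ∧
      ∀ x, x ∈ prev :: dedupFrom prev t ↔ x ∈ prev :: t) := by
  induction t with
  | nil => intro prev _; simp [dedupFrom]
  | cons y ys ih =>
    intro prev hp
    rw [List.pairwise_cons] at hp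
    obtain ⟨hprev, hyys⟩ := hp
    by_cases hy : y = prev
    · subst hy
      have hp' : (y :: ys).Pairwise (fun a b => lexKey a ≤ lexKey b) := hyys
      have := ih y hp'
      simp only [dedupFrom]
      refine ⟨this.1, fun x => ?_⟩
      have := this.2 x
      simp only [List.mem_cons] at this ⊢
      tauto
    · have hp' : (y :: ys).Pairwise (fun a b => lexKey a ≤ lexKey b) := hyys
      have ihy := ih y hp'
      simp only [dedupFrom, if_neg hy]
      constructor
      · rw [List.pairwise_cons]
        refine ⟨?_, ihy.1⟩
        intro z hz
        have hzy : z ∈ y :: dedupFrom y ys := hz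
        have hpy : lexKey prev < lexKey y :=
          lt_of_le_of_ne (hprev y (by simp)) (fun h => hy (lexKey_inj h).symm)
        rcases List.mem_cons.mp hzy with h | h
        · subst h; exact hpy
        · have : lexKey y < lexKey z := by
            have := ihy.1
            rw [List.pairwise_cons] at this
            exact this.1 z h
          exact lt_trans hpy this
      · intro x
        have := ihy.2 x
        simp only [List.mem_cons] at this ⊢
        tauto

lemma pairwise_lt_nodup {l : List (Int × Int)}
    (h : l.Pairwise (fun a b => lexKey a < lexKey b)) : l.Nodup :=
  h.imp (fun hlt => by rintro rfl; exact absurd hlt (lt_irrefl _))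

-- the common value: head-anchored consecutive dedup of the sorted list
def dest (elist : List (Int × Int)) : List (Int × Int) :=
  match PySem.List.sorted2 elist Prod.fst Prod.snd with
  | [] => []
  | h :: t => h :: dedupFrom h t

lemma dest_eq_alt (elist : List (Int × Int)) : sortUpEdgeList_alt elist = dest elist := by
  unfold sortUpEdgeList_alt dest
  rw [sorted2_eq_sorted_lex, sorted2_eq_sorted_lex]
  cases hs : PySem.List.sorted elist lexKey with
  | nil =>
    have : elist = [] := by
      have := PySem.List.sorted_perm elist lexKey false
      rw [hs] at this
      exact (List.Perm.nil_eq this).symm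
    subst this
    exact hs
  | cons h t =>
    have hpw : (h :: t).Pairwise (fun a b => lexKey a ≤ lexKey b) := by
      rw [← hs]; exact PySem.List.sorted_pairwise elist lexKey
    have hd := dedupFrom_spec t h hpw
    apply PySem.List.sorted_eq_of_perm_of_pairwise_lt
    · -- Perm to the set of elist
      rw [List.perm_ext_iff_of_nodup (pairwise_lt_nodup hd.1) (PySem.Set.nodup_ofList elist)]
      intro x
      rw [hd.2 x, PySem.Set.mem_ofList]
      have hmem : x ∈ h :: t ↔ x ∈ elist := by
        rw [← hs]
        exact (PySem.List.sorted_perm elist lexKey false).mem_iff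
      exact hmem
    · exact hd.1

-- take of a set-at-(n) list, used for the loop's in-place write
lemma take_set_succ (xs : List (Int × Int)) (n : Nat) (v : Int × Int) (h : n < xs.length) :
    (xs.set n v).take (n + 1) = xs.take n ++ [v] := by
  rw [List.set_eq_take_cons_drop v h, List.take_append]
  simp [List.take_take, List.length_take, Nat.min_eq_left (Nat.le_of_lt h)]

lemma drop_set_of_lt' (xs : List (Int × Int)) (n m : Nat) (v : Int × Int) (h : n < m) :
    (xs.set n v).drop m = xs.drop m := by
  apply List.ext_getElem
  · simp
  · intro i h1 h2
    simp only [List.getElem_drop, List.getElem_set]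
    rw [if_neg]
    omega

-- main loop invariant: pruneLoop computes the consecutive dedup of the unprocessed suffix
lemma pruneLoop_spec : ∀ (fuel : Nat) (res : List (Int × Int)) (n1 n2 : Nat),
    n1 < n2 → res.length ≤ n2 + fuel →
    ∃ (res' : List (Int × Int)) (m : Nat),
      pruneLoop res (↑n1) (↑n2) (↑res.length) fuel = (res', ↑m) ∧
      res'.length = res.length ∧
      res'.take (m + 1) = res.take (n1 + 1) ++ dedupFrom (res.getD n1 (0, 0)) (res.drop n2) := by
  intro fuel
  induction fuel with
  | zero =>
    intro res n1 n2 h12 hlen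
    refine ⟨res, n1, rfl, rfl, ?_⟩
    rw [List.drop_eq_nil_of_le (by omega)]
    simp [dedupFrom]
  | succ fuel ih =>
    intro res n1 n2 h12 hlen
    by_cases hlt : n2 < res.length
    · have hcond : ((n2 : Int) < (res.length : Int)) := by exact_mod_cast hlt
      have hn1 : n1 < res.length := lt_trans h12 hlt
      simp only [pruneLoop, if_pos hcond, PySem.List.pyGetD_natCast]
      have hg1 : res.getD n1 (0, 0) = res[n1] := List.getD_eq_getElem res (0,0) hn1
      have hg2 : res.getD n2 (0, 0) = res[n2] := List.getD_eq_getElem res (0,0) hlt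
      have hdropn2 : res.drop n2 = res[n2] :: res.drop (n2 + 1) := by
        rw [List.getElem_cons_drop]
      by_cases heq : res.getD n1 (0, 0) = res.getD n2 (0, 0)
      · rw [if_neg (by simpa using heq)]
        have hcast : ((n2 : Int) + 1) = ((n2 + 1 : Nat) : Int) := by push_cast; ring
        rw [hcast]
        obtain ⟨res', m, hrun, hlen', htake⟩ := ih res n1 (n2 + 1) (by omega) (by omega)
        refine ⟨res', m, hrun, hlen', ?_⟩
        have hstep : dedupFrom (res.getD n1 (0,0)) (res[n2] :: res.drop (n2+1)) =
            dedupFrom (res.getD n1 (0,0)) (res.drop (n2+1)) := by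
          rw [dedupFrom, if_pos (by rw [← hg2, heq])]
        rw [htake, hdropn2, hstep]
      · rw [if_pos (by simpa using heq)]
        set x2 := res.getD n2 (0, 0) with hx2
        have hn1' : n1 + 1 ≤ n2 := h12
        have hn1lt : n1 + 1 < res.length + 1 := by omega
        have hsetc : ((n1 : Int) + 1) = ((n1 + 1 : Nat) : Int) := by push_cast; ring
        have hsetc2 : ((n2 : Int) + 1) = ((n2 + 1 : Nat) : Int) := by push_cast; ring
        rw [hsetc, hsetc2, PySem.List.pySetD_natCast]
        set res2 := res.set (n1 + 1) x2 with hres2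
        have hlen2 : res2.length = res.length := by simp [hres2]
        have hrange : n1 + 1 < res.length := by omega
        obtain ⟨res', m, hrun, hlen', htake⟩ := ih res2 (n1 + 1) (n2 + 1) (by omega) (by omega)
        rw [hlen2] at hrun hlen'
        refine ⟨res', m, hrun, hlen', ?_⟩
        rw [htake]
        have h1 : res2.take (n1 + 1 + 1) = res.take (n1 + 1) ++ [x2] :=
          take_set_succ res (n1 + 1) x2 hrange
        have h2 : res2.drop (n2 + 1) = res.drop (n2 + 1) :=
          drop_set_of_lt' res (n1 + 1) (n2 + 1) x2 (by omega)
        have h3 : res2.getD (n1 + 1) (0, 0) = x2 := by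
          rw [List.getD_eq_getElem res2 (0,0) (by omega)]
          simp [hres2, List.getElem_set_self]
        have hne : res[n2] ≠ res.getD n1 (0, 0) := by
          rw [← hg2]; exact fun h => heq h.symm
        have hstep : dedupFrom (res.getD n1 (0,0)) (res[n2] :: res.drop (n2+1)) =
            res[n2] :: dedupFrom res[n2] (res.drop (n2+1)) := by
          rw [dedupFrom, if_neg hne]
        rw [h1, h2, h3, hdropn2, hstep, hg2]
        simp
    · have hcond : ¬ ((n2 : Int) < (res.length : Int)) := by exact_mod_cast hlt
      simp only [pruneLoop, if_neg hcond]
      refine ⟨res, n1, rfl, rfl, ?_⟩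
      rw [List.drop_eq_nil_of_le (by omega)]
      simp [dedupFrom]

lemma a_eq_dest (elist : List (Int × Int)) : sortUpEdgeList elist = dest elist := by
  simp only [sortUpEdgeList, PySem.List.len_eq]
  set s := PySem.List.sorted2 elist Prod.fst Prod.snd with hs
  have hslen : s.length = elist.length := by
    rw [hs]; exact (PySem.List.sorted2_perm elist Prod.fst Prod.snd false).length_eq
  obtain ⟨res', m, hrun, hlen', htake⟩ :=
    pruneLoop_spec (elist.length - 1) s 0 1 (by omega) (by omega)
  have hrun' : pruneLoop s 0 1 (↑elist.length) ((↑elist.length - 1 : Int)).toNat = (res', (↑m : Int)) := by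
    have hfuel : ((↑elist.length - 1 : Int)).toNat = elist.length - 1 := by omega
    rw [hfuel, show ((elist.length : Int)) = ((s.length : Int)) by rw [hslen]]
    simpa using hrun
  have hrhs : s.take (0 + 1) ++ dedupFrom (s.getD 0 (0, 0)) (s.drop 1) = dest elist := by
    unfold dest
    rw [← hs]
    cases s with
    | nil => simp [dedupFrom]
    | cons h t => simp
  rw [hrun']
  split_ifs with hcond
  · show PySem.List.slice res' none (some ((m : Int) + 1)) = dest elist
    have hslice : PySem.List.slice res' none (some ((m : Int) + 1)) = res'.take (m + 1) := by
      rw [show ((m : Int) + 1) = (((m + 1 : Nat)) : Int) by push_cast; ring]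
      exact PySem.List.slice_to_natCast res' (m + 1)
    rw [hslice, htake, hrhs]
  · show res' = dest elist
    have hmeq : ((m : Int)) = (↑elist.length : Int) - 1 := not_not.mp hcond
    have hm' : m = elist.length - 1 ∧ 1 ≤ elist.length := by constructor <;> omega
    have hr : res' = res'.take (m + 1) := by
      rw [List.take_of_length_le]; omega
    rw [hr, htake, hrhs]

-- ===== VERDICT (by name: the statement is the Claim_ definition above) =====
theorem sortUpEdgeList_spec : Claim_equal_sortUpEdgeList := by
  intro elist _
  unfold Spec_sortUpEdgeList
  rw [a_eq_dest, dest_eq_alt]
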